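-- pv_equiv track=rewrite | github.com/brandonnicholls/CSE3CAP | firefind/parsers/csv_parser.py | _find_header_row_and_headers
-- ===== SOURCE A (Python) =====
-- from typing import List, Dict, Any, Optional
--
-- REQUIRED_KEYS = {"id", "action"}  # minimal keys to confirm header row
--
-- HEADER_ALIASES = {
--     "id": {"id", "policy id", "policyid"},
--     "name": {"name", "policy name"},
--     "action": {"action"},
--     "src_addr": {
--         "address | user | device", "source", "src addr", "src address", "src addresses",
--         "source address", "source addresses"
--     },
--     "dst_addr": {
--         "address", "destination", "dst addr", "dst address", "dst addresses",
--         "destination address", "destination addresses"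
--     },
--     "service": {"service | name", "service", "services"},
--     "comments": {"comments", "comment", "remarks", "notes"},
-- }
--
-- def _norm(s) -> str:
--     """Normalize any value to a stripped string (or empty)."""
--     return "" if s is None else str(s).strip()
--
-- def _lower(s) -> str:
--     """Lowercased normalized string."""
--     return _norm(s).lower()
--
-- def _looks_like_header(cells: List[str]) -> bool:
--     """
--     Decide if a row is a header by checking required keys + any of service/src/dst.
--     """
--     headers = [_norm(c) for c in cells]
--     lower = [_lower(c) for c in headers]
--     present = set()
--     if any(h in HEADER_ALIASES["id"] for h in lower): present.add("id")
--     if any(h in HEADER_ALIASES["action"] for h in lower): present.add("action")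
--     if any(h in HEADER_ALIASES["service"] for h in lower): present.add("service")
--     if any(h in HEADER_ALIASES["src_addr"] for h in lower): present.add("src_addr")
--     if any(h in HEADER_ALIASES["dst_addr"] for h in lower): present.add("dst_addr")
--     return REQUIRED_KEYS.issubset(present) and ("service" in present or "src_addr" in present or "dst_addr" in present)
--
-- def _find_header_row_and_headers(rows: List[List[str]]):
--     """
--     Find header row within the first ~50 rows (CSV often has banner lines).
--     Returns (row_index, headers_list). Fallback = first row.
--     """
--     scan = min(50, len(rows))
--     for i in range(scan):
--         if _looks_like_header(rows[i]):
--             headers = [_norm(c) for c in rows[i]]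
--             # trim trailing empties
--             while headers and headers[-1] == "":
--                 headers.pop()
--             return i, headers
--     first = rows[0] if rows else []
--     headers = [_norm(c) for c in first]
--     return 0, headers
-- ===== SOURCE B (Python) =====
-- from typing import List
--
-- REQUIRED_KEYS = {"id", "action"}
--
-- HEADER_ALIASES = {
--     "id": {"id", "policy id", "policyid"},
--     "name": {"name", "policy name"},
--     "action": {"action"},
--     "src_addr": {
--         "address | user | device", "source", "src addr", "src address", "src addresses",
--         "source address", "source addresses"
--     },
--     "dst_addr": {
--         "address", "destination", "dst addr", "dst address", "dst addresses",
--         "destination address", "destination addresses"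
--     },
--     "service": {"service | name", "service", "services"},
--     "comments": {"comments", "comment", "remarks", "notes"},
-- }
--
-- # Inverted index: alias string -> key name (alias sets are pairwise disjoint).
-- _ALIAS_INDEX = {alias: key for key, aliases in HEADER_ALIASES.items() for alias in aliases}
--
--
-- def _norm(s) -> str:
--     return "" if s is None else str(s).strip()
--
--
-- def _header_like(cells: List[str]) -> bool:
--     """Single pass over the lowercased cells, resolving each through the index."""
--     present = set()
--     for c in cells:
--         key = _ALIAS_INDEX.get(c.lower())
--         if key is not None:
--             present.add(key)
--     return REQUIRED_KEYS.issubset(present) and (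
--         "service" in present or "src_addr" in present or "dst_addr" in present
--     )
--
--
-- def _last_nonempty(cells: List[str]) -> int:
--     """Index just past the last non-empty cell, found in one forward pass."""
--     last = 0
--     for j, c in enumerate(cells, 1):
--         if c != "":
--             last = j
--     return last
--
--
-- def _find_header_row_and_headers(rows: List[List[str]]):
--     for i, row in enumerate(rows[:50]):
--         cells = [_norm(c) for c in row]
--         if _header_like(cells):
--             return i, cells[:_last_nonempty(cells)]
--     first = rows[0] if rows else []
--     return 0, [_norm(c) for c in first]
-- ===== Notes on version B (the rewrite author's own statement) =====
-- stated objective: alternative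
-- what changed: The header test's five separate any()-scans of the cell list are replaced by one pass over the cells through a precomputed inverted alias-to-key dict (valid because the alias sets are pairwise disjoint), the index-based range(scan) loop by enumerate over rows[:50], and the backwards pop-while trim by a single forward pass recording the position after the last non-empty cell.
import Mathlib
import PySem

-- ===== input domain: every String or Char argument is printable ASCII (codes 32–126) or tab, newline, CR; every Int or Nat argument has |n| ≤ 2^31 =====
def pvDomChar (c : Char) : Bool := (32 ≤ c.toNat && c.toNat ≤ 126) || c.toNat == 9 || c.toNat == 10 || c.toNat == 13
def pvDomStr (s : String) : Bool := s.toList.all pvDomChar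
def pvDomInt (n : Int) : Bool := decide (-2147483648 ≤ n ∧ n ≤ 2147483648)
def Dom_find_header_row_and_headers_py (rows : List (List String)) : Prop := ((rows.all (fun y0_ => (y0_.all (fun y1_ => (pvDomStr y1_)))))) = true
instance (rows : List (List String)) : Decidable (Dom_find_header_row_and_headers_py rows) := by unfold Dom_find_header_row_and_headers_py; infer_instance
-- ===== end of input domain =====

-- B replaces A's five any() scans over the cells by one pass through an inverted alias→key
-- index and A's backwards pop-loop trim by a forward last-non-empty cut (objective: alternative).

-- ===== PORT A =====
-- shared module constants (Python set literals; only membership is observed, so a list of the distinct elements)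
def pvAliasId : List String := ["id", "policy id", "policyid"]
def pvAliasAction : List String := ["action"]
def pvAliasService : List String := ["service | name", "service", "services"]
def pvAliasSrc : List String := ["address | user | device", "source", "src addr", "src address", "src addresses", "source address", "source addresses"]
def pvAliasDst : List String := ["address", "destination", "dst addr", "dst address", "dst addresses", "destination address", "destination addresses"]
def pvRequired : PySem.Set String := PySem.Set.ofList ["id", "action"]

-- _norm: inputs are strings (never None), so str(s) is the identity
def pvNorm (s : String) : String := PySem.Str.strip s
-- _lower
def pvLowerF (s : String) : String := PySem.Str.lower (pvNorm s)

def pvLooksA (cells : List String) : Bool :=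
  let headers := cells.map pvNorm
  let lower := headers.map pvLowerF
  let present : PySem.Set String := PySem.Set.empty
  let present := if lower.any (fun h => pvAliasId.contains h) then PySem.Set.add present "id" else present
  let present := if lower.any (fun h => pvAliasAction.contains h) then PySem.Set.add present "action" else present
  let present := if lower.any (fun h => pvAliasService.contains h) then PySem.Set.add present "service" else present
  let present := if lower.any (fun h => pvAliasSrc.contains h) then PySem.Set.add present "src_addr" else present
  let present := if lower.any (fun h => pvAliasDst.contains h) then PySem.Set.add present "dst_addr" else present
  PySem.Set.issubset pvRequired present &&
    (PySem.Set.contains present "service" || PySem.Set.contains present "src_addr" || PySem.Set.contains present "dst_addr")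

-- while headers and headers[-1] == "": headers.pop()
def pvTrimA (hs : List String) : List String :=
  if h : hs.getLast? = some "" then pvTrimA hs.dropLast else hs
termination_by hs.length
decreasing_by
  cases hs with
  | nil => simp at h
  | cons a t => simp [List.length_dropLast]

-- for i in range(scan): … (indices of range(scan) are always in range, so rows[i] is pyGetD)
def pvScanA (rows : List (List String)) : List Int → Option (Int × List String)
  | [] => none
  | i :: rest =>
    let row := PySem.List.pyGetD rows i []
    if pvLooksA row then
      some (i, pvTrimA (row.map pvNorm))
    else pvScanA rows rest

def find_header_row_and_headers_py (rows : List (List String)) : Int × List String :=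
  let scan : Int := min 50 (rows.length : Int)
  match pvScanA rows (PySem.List.pyRange 0 scan 1) with
  | some r => r
  | none =>
    let first := match rows with | [] => [] | r :: _ => r
    (0, first.map pvNorm)

-- ===== PORT B =====
-- _ALIAS_INDEX: alias → key (the dict comprehension's mapping; keys of HEADER_ALIASES in order,
-- aliases pairwise distinct, and only .get is used, so the literal order is not observable)
def pvAliasIndex : PySem.Dict String String := PySem.Dict.ofList
  [("id", "id"), ("policy id", "id"), ("policyid", "id"),
   ("name", "name"), ("policy name", "name"),
   ("action", "action"),
   ("address | user | device", "src_addr"), ("source", "src_addr"), ("src addr", "src_addr"),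
   ("src address", "src_addr"), ("src addresses", "src_addr"), ("source address", "src_addr"),
   ("source addresses", "src_addr"),
   ("address", "dst_addr"), ("destination", "dst_addr"), ("dst addr", "dst_addr"),
   ("dst address", "dst_addr"), ("dst addresses", "dst_addr"), ("destination address", "dst_addr"),
   ("destination addresses", "dst_addr"),
   ("service | name", "service"), ("service", "service"), ("services", "service"),
   ("comments", "comments"), ("comment", "comments"), ("remarks", "comments"), ("notes", "comments")]

def pvHeaderLikeB (cells : List String) : Bool :=
  let present : PySem.Set String := cells.foldl (fun s c =>
    match PySem.Dict.get? pvAliasIndex (PySem.Str.lower c) with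
    | some k => PySem.Set.add s k
    | none => s) PySem.Set.empty
  PySem.Set.issubset pvRequired present &&
    (PySem.Set.contains present "service" || PySem.Set.contains present "src_addr" || PySem.Set.contains present "dst_addr")

-- _last_nonempty: one forward pass recording the position just past the last non-empty cell
def pvLastNE (cells : List String) : Int :=
  (PySem.List.enumerate cells 1).foldl (fun last jc => if jc.2 ≠ "" then jc.1 else last) 0

def pvScanB : List (Int × List String) → Option (Int × List String)
  | [] => none
  | (i, row) :: rest =>
    let cells := row.map pvNorm
    if pvHeaderLikeB cells then some (i, PySem.List.slice cells none (some (pvLastNE cells)))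
    else pvScanB rest

def find_header_row_and_headers_py_alt (rows : List (List String)) : Int × List String :=
  match pvScanB (PySem.List.enumerate (PySem.List.slice rows none (some 50)) 0) with
  | some r => r
  | none =>
    let first := match rows with | [] => [] | r :: _ => r
    (0, first.map pvNorm)

-- ===== PRECONDITION & SPEC =====
def Spec_find_header_row_and_headers_py (rows : List (List String)) (out : Int × List String) : Prop := out = find_header_row_and_headers_py_alt rows
instance (rows : List (List String)) (out : Int × List String) : Decidable (Spec_find_header_row_and_headers_py rows out) := by unfold Spec_find_header_row_and_headers_py; infer_instance

-- ===== CLAIM (what is proved, stated in full; the proofs are below) =====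
def Claim_equal_find_header_row_and_headers_py : Prop := ∀ (rows : List (List String)), Dom_find_header_row_and_headers_py rows → Spec_find_header_row_and_headers_py rows (find_header_row_and_headers_py rows)

-- ===== LEMMAS AND PROOFS =====

-- strip is idempotent (needed because A lowercases already-stripped headers and B strips once)
theorem pv_dropWhile_prefix (p : Char → Bool) (m t : List Char) (hp : t <+: m)
    (hm : m.dropWhile p = m) : t.dropWhile p = t := by
  cases t with
  | nil => simp
  | cons a t' =>
    obtain ⟨u, rfl⟩ := hp
    rw [List.cons_append, List.dropWhile_cons] at hm
    rw [List.dropWhile_cons]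
    by_cases hpa : p a = true
    · rw [if_pos hpa] at hm
      have hle := List.length_dropWhile_le p (t' ++ u)
      have hlen := congrArg List.length hm
      rw [List.length_cons] at hlen
      omega
    · rw [if_neg hpa]

theorem pv_rstrip_prefix (p : Char → Bool) (m : List Char) :
    (m.reverse.dropWhile p).reverse <+: m := by
  have := (List.dropWhile_suffix (l := m.reverse) p).reverse
  simpa using this

theorem pv_strip_idem_chars (cs : List Char) :
    PySem.Chars.strip (PySem.Chars.strip cs) = PySem.Chars.strip cs := by
  simp only [PySem.Chars.strip, PySem.Chars.lstrip, PySem.Chars.rstrip]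
  rw [pv_dropWhile_prefix PySem.Chars.isspace (cs.dropWhile PySem.Chars.isspace)
        _ (pv_rstrip_prefix _ _) (List.dropWhile_idempotent _ _)]
  simp [List.dropWhile_idempotent]

theorem pv_strip_idem (s : String) :
    PySem.Str.strip (PySem.Str.strip s) = PySem.Str.strip s := by
  simp [PySem.Str.strip, pv_strip_idem_chars]

-- the inverted index's items, as a flat literal list
theorem pvItems : pvAliasIndex.items =
    [("id", "id"), ("policy id", "id"), ("policyid", "id"),
     ("name", "name"), ("policy name", "name"),
     ("action", "action"),
     ("address | user | device", "src_addr"), ("source", "src_addr"), ("src addr", "src_addr"),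
     ("src address", "src_addr"), ("src addresses", "src_addr"), ("source address", "src_addr"),
     ("source addresses", "src_addr"),
     ("address", "dst_addr"), ("destination", "dst_addr"), ("dst addr", "dst_addr"),
     ("dst address", "dst_addr"), ("dst addresses", "dst_addr"), ("destination address", "dst_addr"),
     ("destination addresses", "dst_addr"),
     ("service | name", "service"), ("service", "service"), ("services", "service"),
     ("comments", "comments"), ("comment", "comments"), ("remarks", "comments"), ("notes", "comments")] := by decide

-- index lookup resolves to key k exactly on k's alias set (alias sets are pairwise disjoint)
theorem pvLookup_id (h : String) : PySem.Dict.get? pvAliasIndex h = some "id" ↔ h ∈ pvAliasId := by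
  rw [PySem.Dict.get?_eq_some_iff_mem_items pvAliasIndex h "id" (by decide), pvItems]
  simp [pvAliasId]

theorem pvLookup_action (h : String) : PySem.Dict.get? pvAliasIndex h = some "action" ↔ h ∈ pvAliasAction := by
  rw [PySem.Dict.get?_eq_some_iff_mem_items pvAliasIndex h "action" (by decide), pvItems]
  simp [pvAliasAction]

theorem pvLookup_service (h : String) : PySem.Dict.get? pvAliasIndex h = some "service" ↔ h ∈ pvAliasService := by
  rw [PySem.Dict.get?_eq_some_iff_mem_items pvAliasIndex h "service" (by decide), pvItems]
  simp [pvAliasService]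

theorem pvLookup_src (h : String) : PySem.Dict.get? pvAliasIndex h = some "src_addr" ↔ h ∈ pvAliasSrc := by
  rw [PySem.Dict.get?_eq_some_iff_mem_items pvAliasIndex h "src_addr" (by decide), pvItems]
  simp [pvAliasSrc]

theorem pvLookup_dst (h : String) : PySem.Dict.get? pvAliasIndex h = some "dst_addr" ↔ h ∈ pvAliasDst := by
  rw [PySem.Dict.get?_eq_some_iff_mem_items pvAliasIndex h "dst_addr" (by decide), pvItems]
  simp [pvAliasDst]

-- membership in B's one-pass present set
theorem pv_mem_fold (l : List String) (s : PySem.Set String) (k : String) :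
    k ∈ l.foldl (fun s c =>
      match PySem.Dict.get? pvAliasIndex (PySem.Str.lower c) with
      | some k' => PySem.Set.add s k'
      | none => s) s ↔
    k ∈ s ∨ ∃ c ∈ l, PySem.Dict.get? pvAliasIndex (PySem.Str.lower c) = some k := by
  induction l generalizing s with
  | nil => simp
  | cons c t ih =>
    simp only [List.foldl_cons]
    cases hc : PySem.Dict.get? pvAliasIndex (PySem.Str.lower c) with
    | none => rw [ih]; simp [hc]
    | some k' =>
      rw [ih]
      simp only [PySem.Set.mem_add, List.mem_cons]
      constructor
      · rintro (⟨hs | rfl⟩ | ⟨d, hd, hget⟩)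
        · exact Or.inl hs
        · exact Or.inr ⟨c, Or.inl rfl, hc⟩
        · exact Or.inr ⟨d, Or.inr hd, hget⟩
      · rintro (hs | ⟨d, (rfl | hd), hget⟩)
        · exact Or.inl (Or.inl hs)
        · rw [hget] at hc
          injection hc with hkk
          exact Or.inl (Or.inr hkk)
        · exact Or.inr ⟨d, hd, hget⟩

-- both header tests equal the same function of the five per-alias-set scans
theorem pv_looksA_eq (row : List String) :
    pvLooksA row =
      ((row.any fun c => pvAliasId.contains (PySem.Str.lower (PySem.Str.strip c))) &&
       (row.any fun c => pvAliasAction.contains (PySem.Str.lower (PySem.Str.strip c))) &&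
       ((row.any fun c => pvAliasService.contains (PySem.Str.lower (PySem.Str.strip c))) ||
        (row.any fun c => pvAliasSrc.contains (PySem.Str.lower (PySem.Str.strip c))) ||
        (row.any fun c => pvAliasDst.contains (PySem.Str.lower (PySem.Str.strip c))))) := by
  simp only [pvLooksA, List.map_map, List.any_map, Function.comp_def, pvLowerF, pvNorm,
    pv_strip_idem]
  generalize (row.any fun c => pvAliasId.contains (PySem.Str.lower (PySem.Str.strip c))) = b1
  generalize (row.any fun c => pvAliasAction.contains (PySem.Str.lower (PySem.Str.strip c))) = b2
  generalize (row.any fun c => pvAliasService.contains (PySem.Str.lower (PySem.Str.strip c))) = b3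
  generalize (row.any fun c => pvAliasSrc.contains (PySem.Str.lower (PySem.Str.strip c))) = b4
  generalize (row.any fun c => pvAliasDst.contains (PySem.Str.lower (PySem.Str.strip c))) = b5
  cases b1 <;> cases b2 <;> cases b3 <;> cases b4 <;> cases b5 <;> decide

theorem pv_looksB_eq (row : List String) :
    pvHeaderLikeB (row.map pvNorm) =
      ((row.any fun c => pvAliasId.contains (PySem.Str.lower (PySem.Str.strip c))) &&
       (row.any fun c => pvAliasAction.contains (PySem.Str.lower (PySem.Str.strip c))) &&
       ((row.any fun c => pvAliasService.contains (PySem.Str.lower (PySem.Str.strip c))) ||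
        (row.any fun c => pvAliasSrc.contains (PySem.Str.lower (PySem.Str.strip c))) ||
        (row.any fun c => pvAliasDst.contains (PySem.Str.lower (PySem.Str.strip c))))) := by
  have hmem : ∀ k : String,
      (k ∈ (row.map pvNorm).foldl (fun s c =>
        match PySem.Dict.get? pvAliasIndex (PySem.Str.lower c) with
        | some k' => PySem.Set.add s k'
        | none => s) PySem.Set.empty) ↔
      ∃ c ∈ row, PySem.Dict.get? pvAliasIndex (PySem.Str.lower (pvNorm c)) = some k := by
    intro k
    rw [pv_mem_fold]
    simp [PySem.Set.empty]
  simp only [pvHeaderLikeB]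
  have hc : ∀ (k : String) (al : List String),
      (∀ h, PySem.Dict.get? pvAliasIndex h = some k ↔ h ∈ al) →
      PySem.Set.contains ((row.map pvNorm).foldl (fun s c =>
        match PySem.Dict.get? pvAliasIndex (PySem.Str.lower c) with
        | some k' => PySem.Set.add s k'
        | none => s) PySem.Set.empty) k
      = (row.any fun c => al.contains (PySem.Str.lower (PySem.Str.strip c))) := by
    intro k al hiff
    rw [Bool.eq_iff_iff]
    rw [PySem.Set.contains, List.contains_iff_mem, hmem, List.any_eq_true]
    constructor
    · rintro ⟨c, hcrow, hget⟩
      exact ⟨c, hcrow, List.contains_iff_mem.mpr ((hiff _).mp hget)⟩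
    · rintro ⟨c, hcrow, hal⟩
      exact ⟨c, hcrow, (hiff _).mpr (List.contains_iff_mem.mp hal)⟩
  have hsub : PySem.Set.issubset pvRequired ((row.map pvNorm).foldl (fun s c =>
        match PySem.Dict.get? pvAliasIndex (PySem.Str.lower c) with
        | some k' => PySem.Set.add s k'
        | none => s) PySem.Set.empty)
      = (PySem.Set.contains ((row.map pvNorm).foldl (fun s c =>
        match PySem.Dict.get? pvAliasIndex (PySem.Str.lower c) with
        | some k' => PySem.Set.add s k'
        | none => s) PySem.Set.empty) "id"
        && PySem.Set.contains ((row.map pvNorm).foldl (fun s c =>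
        match PySem.Dict.get? pvAliasIndex (PySem.Str.lower c) with
        | some k' => PySem.Set.add s k'
        | none => s) PySem.Set.empty) "action") := by
    rw [show pvRequired = ["id", "action"] from by decide]
    simp [PySem.Set.issubset]
  rw [hsub, hc "id" pvAliasId pvLookup_id, hc "action" pvAliasAction pvLookup_action,
    hc "service" pvAliasService pvLookup_service, hc "src_addr" pvAliasSrc pvLookup_src,
    hc "dst_addr" pvAliasDst pvLookup_dst]

theorem pv_looks_eq (row : List String) : pvLooksA row = pvHeaderLikeB (row.map pvNorm) := by
  rw [pv_looksA_eq, pv_looksB_eq]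

-- the forward last-non-empty cut equals A's backwards pop loop
theorem pvLastNE_append (hs : List String) (x : String) :
    pvLastNE (hs ++ [x]) = if x ≠ "" then ((hs.length : Int) + 1) else pvLastNE hs := by
  unfold pvLastNE
  rw [PySem.List.enumerate_append, List.foldl_append]
  simp only [PySem.List.enumerate_cons, PySem.List.enumerate_nil, List.foldl_cons, List.foldl_nil]
  by_cases hx : x = ""
  · rw [if_neg (by simp [hx]), if_neg (by simp [hx])]
  · rw [if_pos (by simp [hx]), if_pos (by simp [hx])]
    ring

theorem pvLastNE_bounds (hs : List String) : 0 ≤ pvLastNE hs ∧ pvLastNE hs ≤ (hs.length : Int) := by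
  induction hs using List.reverseRecOn with
  | nil => simp [pvLastNE]
  | append_singleton hs x ih =>
    rw [pvLastNE_append]
    by_cases hx : x = ""
    · rw [if_neg (by simp [hx])]
      simp only [List.length_append, List.length_cons, List.length_nil]
      push_cast
      omega
    · rw [if_pos (by simp [hx])]
      simp only [List.length_append, List.length_cons, List.length_nil]
      push_cast
      omega

theorem pv_trim_take (hs : List String) : pvTrimA hs = hs.take (pvLastNE hs).toNat := by
  induction hs using List.reverseRecOn with
  | nil => rw [pvTrimA]; simp
  | append_singleton hs x ih =>
    rw [pvTrimA, pvLastNE_append]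
    by_cases hx : x = ""
    · subst hx
      rw [dif_pos List.getLast?_concat, List.dropLast_concat, if_neg (by simp)]
      have hle : (pvLastNE hs).toNat ≤ hs.length := by
        have := pvLastNE_bounds hs; omega
      rw [List.take_append_of_le_length hle]
      exact ih
    · rw [dif_neg (by simp [List.getLast?_concat, hx]), if_pos hx]
      have h2 : ((hs.length : Int) + 1).toNat = hs.length + 1 := by omega
      rw [h2, List.take_of_length_le (by simp)]

theorem pv_trim_eq (hs : List String) :
    pvTrimA hs = PySem.List.slice hs none (some (pvLastNE hs)) := by
  rw [PySem.List.slice_to hs (pvLastNE_bounds hs).1]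
  exact pv_trim_take hs

-- the index scan over range(scan) equals the enumerate scan over the 50-row prefix
theorem pv_scan_eq (l : List (List String)) : ∀ (pre ext : List (List String)),
    pvScanA (pre ++ (l ++ ext))
      (PySem.List.pyRange (pre.length : Int) ((pre.length : Int) + (l.length : Int)) 1)
    = pvScanB (PySem.List.enumerate l (pre.length : Int)) := by
  induction l with
  | nil =>
    intro pre ext
    rw [PySem.List.pyRange_one_eq_nil (by simp)]
    simp [pvScanA, pvScanB, PySem.List.enumerate_nil]
  | cons r t ih =>
    intro pre ext
    rw [PySem.List.pyRange_one_cons (by push_cast [List.length_cons]; omega)]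
    rw [PySem.List.enumerate_cons]
    simp only [pvScanA, pvScanB]
    have hrow : PySem.List.pyGetD (pre ++ (r :: t ++ ext)) (pre.length : Int) [] = r := by
      rw [PySem.List.pyGetD_natCast]
      simp [List.getD, List.getElem?_append_right (Nat.le_refl pre.length)]
    rw [hrow, pv_looks_eq r]
    cases hl : pvHeaderLikeB (r.map pvNorm) with
    | true =>
      simp [pv_trim_eq]
    | false =>
      simp only [Bool.false_eq_true, if_false]
      have harg : ((pre.length : Int) + ((r :: t).length : Int))
          = (((pre ++ [r]).length : Int) + (t.length : Int)) := by
        simp; omega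
      have hlen1 : ((pre.length : Int) + 1) = (((pre ++ [r]).length : Int)) := by
        simp
      rw [harg, show pre ++ (r :: t ++ ext) = (pre ++ [r]) ++ (t ++ ext) from by simp, hlen1]
      exact ih (pre ++ [r]) ext

-- ===== VERDICT (by name: the statement is the Claim_ definition above) =====
theorem find_header_row_and_headers_py_spec : Claim_equal_find_header_row_and_headers_py := by
  intro rows _
  unfold Spec_find_header_row_and_headers_py
  have hm : (min 50 (rows.length : Int)) = ((min 50 rows.length : Nat) : Int) := by
    rw [Nat.cast_min]; norm_num
  have htake : PySem.List.slice rows none (some 50) = rows.take (min 50 rows.length) := by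
    rw [PySem.List.slice_to rows (by norm_num)]
    rw [show ((50 : Int)).toNat = 50 from rfl]
    rw [← List.take_length (l := rows), List.take_take, List.take_length]
  have h0 := pv_scan_eq (rows.take (min 50 rows.length)) [] (rows.drop (min 50 rows.length))
  simp only [List.nil_append, List.take_append_drop, List.length_nil, Nat.cast_zero, zero_add,
    List.length_take] at h0
  have hmin : min (min 50 rows.length) rows.length = min 50 rows.length := by omega
  rw [hmin] at h0
  simp only [find_header_row_and_headers_py, find_header_row_and_headers_py_alt]
  rw [hm, htake, h0]
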